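-- pv_equiv track=rewrite | github.com/raullenchai/vllm-mlx | vllm_mlx/service/postprocessor.py | _find_trailing_calling_tool_prefix
-- ===== SOURCE A (Python) =====
-- def _starts_current_line(text: str, start: int) -> bool:
--     """Return True when start is preceded only by whitespace on its line."""
--     line_start = max(text.rfind("\n", 0, start), text.rfind("\r", 0, start)) + 1
--     return text[line_start:start].strip() == ""
--
-- def _find_trailing_calling_tool_prefix(text: str) -> int | None:
--     marker = "Calling tool:"
--     tail_end = len(text.rstrip())
--     tail = text[:tail_end]
--
--     if tail.endswith("["):
--         start = len(tail) - 1
--         if _starts_current_line(tail, start):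
--             return start
--
--     for i in range(1, len(marker)):
--         partial = marker[:i]
--         if tail.endswith(partial):
--             start = len(tail) - len(partial)
--             if _starts_current_line(tail, start):
--                 return start
--         if tail.endswith(f"[{partial}"):
--             start = len(tail) - len(partial) - 1
--             if _starts_current_line(tail, start):
--                 return start
--     return None
-- ===== SOURCE B (Python) =====
-- def _find_trailing_calling_tool_prefix(text: str) -> int | None:
--     marker = "Calling tool:"
--     tail = text[:len(text.rstrip())]
--     line_start = max(tail.rfind("\n"), tail.rfind("\r")) + 1
--     core = tail[line_start:].lstrip()
--     start = len(tail) - len(core)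
--     if not core:
--         return None
--     if core == "[":
--         return start
--     candidate = core[1:] if core.startswith("[") else core
--     if 1 <= len(candidate) < len(marker) and marker.startswith(candidate):
--         return start
--     return None
-- ===== Notes on version B (the rewrite author's own statement) =====
-- stated objective: simpler
-- what changed: A scans 25 candidate suffixes ('[' plus every proper marker prefix with and without a leading '['), re-running an endswith and a bounded-rfind line-start check for each; B extracts the stripped token of the final line once and classifies it with a single prefix test against the marker.
import Mathlib
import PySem

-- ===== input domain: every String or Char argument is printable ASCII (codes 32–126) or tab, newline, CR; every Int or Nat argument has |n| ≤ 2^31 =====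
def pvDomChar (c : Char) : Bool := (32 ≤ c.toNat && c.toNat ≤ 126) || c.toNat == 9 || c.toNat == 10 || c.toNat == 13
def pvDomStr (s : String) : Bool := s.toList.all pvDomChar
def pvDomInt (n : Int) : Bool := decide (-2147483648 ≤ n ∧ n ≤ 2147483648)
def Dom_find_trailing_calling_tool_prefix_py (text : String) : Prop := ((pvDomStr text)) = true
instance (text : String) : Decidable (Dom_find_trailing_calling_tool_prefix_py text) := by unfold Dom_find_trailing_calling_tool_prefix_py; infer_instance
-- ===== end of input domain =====

-- B replaces A's 25-way scan (the '[' check plus a loop over every prefix length of the marker, each with its own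
-- endswith + line-start test) by extracting the final line's stripped token once and classifying it with a single
-- prefix test; same return value, objective: simpler.

-- ===== PORT A =====
-- port of _starts_current_line
def startsCurrentLineA (text : List Char) (start : Int) : Bool :=
  let lineStart : Int :=
    max (PySem.Chars.rfindFrom text ['\n'] 0 (some start))
        (PySem.Chars.rfindFrom text ['\r'] 0 (some start)) + 1
  PySem.Chars.strip (PySem.List.slice text (some lineStart) (some start)) == []

-- the 'for i in range(1, len(marker))' loop of A, with its two early-return checks per iteration
def aLoop (tail marker : List Char) : List Int → Option Int
  | [] => none
  | i :: rest =>
    let part := PySem.List.slice marker none (some i)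
    let s1 : Int := (tail.length : Int) - part.length
    let s2 : Int := (tail.length : Int) - part.length - 1
    if PySem.Chars.endswith tail part && startsCurrentLineA tail s1 then some s1
    else if PySem.Chars.endswith tail ('[' :: part) && startsCurrentLineA tail s2 then some s2
    else aLoop tail marker rest

-- A's body after computing tail
def aMain (tail marker : List Char) : Option Int :=
  if PySem.Chars.endswith tail ['['] && startsCurrentLineA tail ((tail.length : Int) - 1) then
    some ((tail.length : Int) - 1)
  else aLoop tail marker (PySem.List.pyRange 1 (PySem.Chars.len marker) 1)

def find_trailing_calling_tool_prefix_py (text : String) : Option Int :=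
  let marker := "Calling tool:".toList
  let tailEnd : Int := ((PySem.Chars.rstrip text.toList).length : Int)
  let tail := PySem.List.slice text.toList none (some tailEnd)
  aMain tail marker

-- ===== PORT B =====
-- B's body after computing tail
def bMain (tail marker : List Char) : Option Int :=
  let lineStart : Int :=
    max (PySem.Chars.rfind tail ['\n']) (PySem.Chars.rfind tail ['\r']) + 1
  let core := PySem.Chars.lstrip (PySem.List.slice tail (some lineStart) none)
  let start : Int := (tail.length : Int) - core.length
  if core = [] then none
  else if core = ['['] then some start
  else
    let candidate := if PySem.Chars.startswith core ['['] then PySem.List.slice core (some 1) none else core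
    if 1 ≤ candidate.length ∧ candidate.length < marker.length ∧ PySem.Chars.startswith marker candidate = true
    then some start else none

def find_trailing_calling_tool_prefix_py_alt (text : String) : Option Int :=
  let marker := "Calling tool:".toList
  let tail := PySem.List.slice text.toList none (some ((PySem.Chars.rstrip text.toList).length : Int))
  bMain tail marker

-- ===== PRECONDITION & SPEC =====
def Spec_find_trailing_calling_tool_prefix_py (text : String) (out : Option Int) : Prop := out = find_trailing_calling_tool_prefix_py_alt text
instance (text : String) (out : Option Int) : Decidable (Spec_find_trailing_calling_tool_prefix_py text out) := by unfold Spec_find_trailing_calling_tool_prefix_py; infer_instance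

-- ===== CLAIM (what is proved, stated in full; the proofs are below) =====
def Claim_equal_find_trailing_calling_tool_prefix_py : Prop := ∀ (text : String), Dom_find_trailing_calling_tool_prefix_py text → Spec_find_trailing_calling_tool_prefix_py text (find_trailing_calling_tool_prefix_py text)

-- ===== LEMMAS AND PROOFS =====


theorem go_succ (s sub : List Char) (j : Nat) :
    PySem.Chars.rfind.go s sub (j+1)
      = if sub.isPrefixOf (s.drop (j+1)) then ((j+1 : Nat) : Int) else PySem.Chars.rfind.go s sub j := by
  simp [PySem.Chars.rfind.go]

theorem go_zero (s sub : List Char) :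
    PySem.Chars.rfind.go s sub 0 = if sub.isPrefixOf s then 0 else -1 := by
  simp [PySem.Chars.rfind.go]

theorem go_self (t sub : List Char) (j : Nat) (h : sub.isPrefixOf (t.drop j) = true) :
    PySem.Chars.rfind.go t sub j = (j : Int) := by
  cases j with
  | zero => rw [go_zero]; simp_all
  | succ j => rw [go_succ, if_pos h]

theorem single_isPrefixOf_append (c d : Char) (xs : List Char) (h : (d == c) = false) :
    [c].isPrefixOf (xs ++ [d]) = [c].isPrefixOf xs := by
  cases xs with
  | nil =>
    simp [List.isPrefixOf]
    rintro rfl; simp at h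
  | cons x xs => simp [List.isPrefixOf]

theorem go_append (s : List Char) (d c : Char) (h : (d == c) = false) :
    ∀ j, j ≤ s.length → PySem.Chars.rfind.go (s ++ [d]) [c] j = PySem.Chars.rfind.go s [c] j := by
  intro j
  induction j with
  | zero => intro _; rw [go_zero, go_zero, single_isPrefixOf_append c d s h]
  | succ j ih =>
    intro hj
    rw [go_succ, go_succ, List.drop_append_of_le_length (by omega), single_isPrefixOf_append c d _ h,
        ih (by omega)]

theorem rfind_snoc (s : List Char) (d c : Char) :
    PySem.Chars.rfind (s ++ [d]) [c] = if d = c then (s.length : Int) else PySem.Chars.rfind s [c] := by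
  unfold PySem.Chars.rfind
  have hlen : (s ++ [d]).length = s.length + 1 := by simp
  have h0 : (s ++ [d]).drop (s.length + 1) = [] := by rw [← hlen, List.drop_length]
  rw [hlen, go_succ, h0]
  have hpre : [c].isPrefixOf ([] : List Char) = false := by simp [List.isPrefixOf]
  rw [hpre, if_neg (by simp)]
  by_cases hdc : d = c
  · subst hdc
    rw [if_pos rfl, go_self]
    rw [List.drop_left]; simp [List.isPrefixOf]
  · have h : (d == c) = false := by simp [hdc]
    rw [if_neg hdc, go_append s d c h s.length le_rfl]

theorem rfind_nil (c : Char) : PySem.Chars.rfind [] [c] = -1 := by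
  simp [PySem.Chars.rfind, PySem.Chars.rfind.go, List.isPrefixOf]

theorem rfind_lt (s : List Char) (c : Char) : PySem.Chars.rfind s [c] < s.length := by
  induction s using List.reverseRecOn with
  | nil => rw [rfind_nil]; simp
  | append_singleton s d ih =>
    rw [rfind_snoc]
    by_cases h : d = c <;> simp [h] <;> omega

theorem rfind_append_nlfree (s l : List Char) (c : Char) (h : ∀ d ∈ l, ¬ d = c) :
    PySem.Chars.rfind (s ++ l) [c] = PySem.Chars.rfind s [c] := by
  induction l using List.reverseRecOn with
  | nil => simp
  | append_singleton l d ih =>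
    rw [← List.append_assoc, rfind_snoc, if_neg (h d (by simp))]
    exact ih (fun x hx => h x (by simp [hx]))

theorem ite_neg_one_self (x : Int) : (if x = -1 then -1 else 0 + x) = x := by
  split_ifs with h <;> omega

theorem rfindFrom_zero_some (s sub : List Char) (e : Int) (he : 0 ≤ e) :
    PySem.Chars.rfindFrom s sub 0 (some e) = PySem.Chars.rfind (s.take e.toNat) sub := by
  unfold PySem.Chars.rfindFrom
  simp only [Int.toNat_zero, List.drop_zero, show ¬ (0:Int) < 0 by omega, if_false]
  by_cases h1 : (s.length : Int) < e
  · rw [if_pos h1, if_neg (by omega), Int.toNat_natCast, List.take_length,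
        List.take_of_length_le (by omega), ite_neg_one_self]
  · rw [if_neg h1, if_neg (by omega : ¬ e < 0), if_neg (by omega : ¬ e < 0), ite_neg_one_self]

def nlF (c : Char) : Bool := !(c == '\n' || c == '\r')
def lineOf (cs : List Char) : List Char := (cs.reverse.takeWhile nlF).reverse
def preOf (cs : List Char) : List Char := (cs.reverse.dropWhile nlF).reverse
def coreOf (cs : List Char) : List Char := PySem.Chars.lstrip (lineOf cs)

-- the marker "Calling tool:" as an explicit character list (kernel-friendly literal)
def Mlit : List Char := ['C','a','l','l','i','n','g',' ','t','o','o','l',':']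

theorem markerEq : "Calling tool:".toList = Mlit := rfl

theorem pre_append_line (cs : List Char) : preOf cs ++ lineOf cs = cs := by
  simp [preOf, lineOf, ← List.reverse_append, List.takeWhile_append_dropWhile]

theorem line_nlF (cs : List Char) : ∀ c ∈ lineOf cs, nlF c = true := by
  intro c hc
  simp only [lineOf, List.mem_reverse] at hc
  exact List.mem_takeWhile_imp hc

theorem pre_shape (cs : List Char) : preOf cs = [] ∨ ∃ a d, preOf cs = a ++ [d] ∧ nlF d = false := by
  unfold preOf
  cases h : cs.reverse.dropWhile nlF with
  | nil => exact Or.inl rfl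
  | cons d rest =>
    refine Or.inr ⟨rest.reverse, d, by simp, ?_⟩
    have := List.head_dropWhile_not nlF (l := cs.reverse) (by simp [h])
    simpa [h] using this

theorem takeWhile_append_all {p : Char → Bool} (l₁ l₂ : List Char) (h : ∀ x ∈ l₁, p x = true) :
    (l₁ ++ l₂).takeWhile p = l₁ ++ l₂.takeWhile p := by
  induction l₁ with
  | nil => simp
  | cons x xs ih => simp [List.takeWhile_cons, h x (by simp), ih (fun y hy => h y (by simp [hy]))]

theorem lineOf_append (u p : List Char) (hp : ∀ c ∈ p, nlF c = true) :
    lineOf (u ++ p) = lineOf u ++ p := by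
  simp only [lineOf, List.reverse_append]
  rw [takeWhile_append_all _ _ (fun x hx => hp x (by simpa using hx))]
  simp

theorem nlF_ne (c d : Char) (h : nlF c = true) (hd : d = '\n' ∨ d = '\r') : ¬ c = d := by
  rintro rfl; rcases hd with rfl | rfl <;> simp [nlF] at h

theorem R_of_decomp (a b : List Char) (hb : ∀ c ∈ b, nlF c = true)
    (ha : a = [] ∨ ∃ a' d, a = a' ++ [d] ∧ nlF d = false) :
    max (PySem.Chars.rfind (a ++ b) ['\n']) (PySem.Chars.rfind (a ++ b) ['\r']) + 1 = (a.length : Int) := by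
  rw [rfind_append_nlfree a b '\n' (fun d hd => nlF_ne d '\n' (hb d hd) (Or.inl rfl)),
      rfind_append_nlfree a b '\r' (fun d hd => nlF_ne d '\r' (hb d hd) (Or.inr rfl))]
  rcases ha with rfl | ⟨a', d, rfl, hd⟩
  · rw [rfind_nil, rfind_nil]; simp
  · have hd' : d = '\n' ∨ d = '\r' := by
      by_contra h
      push_neg at h
      simp [nlF, h.1, h.2] at hd
    have h1 := rfind_lt a' '\n'
    have h2 := rfind_lt a' '\r'
    rcases hd' with rfl | rfl <;>
      rw [rfind_snoc, rfind_snoc] <;> simp <;> omega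

theorem strip_eq_nil_iff (xs : List Char) :
    PySem.Chars.strip xs = [] ↔ ∀ c ∈ xs, PySem.Chars.isspace c = true := by
  unfold PySem.Chars.strip PySem.Chars.rstrip PySem.Chars.lstrip
  constructor
  · intro h c hc
    have h' : ∀ c ∈ (xs.dropWhile PySem.Chars.isspace).reverse, PySem.Chars.isspace c = true := by
      rw [← List.dropWhile_eq_nil_iff]
      simpa using h
    have hsplit : c ∈ xs.takeWhile PySem.Chars.isspace ++ xs.dropWhile PySem.Chars.isspace := by
      rw [List.takeWhile_append_dropWhile]; exact hc
    rcases List.mem_append.mp hsplit with h1 | h1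
    · exact List.mem_takeWhile_imp h1
    · exact h' c (by simpa using h1)
  · intro h
    have : xs.dropWhile PySem.Chars.isspace = [] := by
      rw [List.dropWhile_eq_nil_iff]; intro x hx; exact h x hx
    simp [this]


theorem startsCL_char (u p : List Char) (hp : ∀ c ∈ p, nlF c = true) :
    startsCurrentLineA (u ++ p) (u.length : Int) = true
      ↔ ∀ c ∈ lineOf u, PySem.Chars.isspace c = true := by
  have hdecomp := pre_append_line u
  have htake : (u ++ p).take ((u.length : Int)).toNat = u := by
    rw [Int.toNat_natCast, List.take_left]
  have hrf : ∀ c : Char,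
      PySem.Chars.rfindFrom (u ++ p) [c] 0 (some (u.length : Int)) = PySem.Chars.rfind u [c] := by
    intro c
    rw [rfindFrom_zero_some _ _ _ (by positivity), htake]
  have hR : max (PySem.Chars.rfind u ['\n']) (PySem.Chars.rfind u ['\r']) + 1
      = ((preOf u).length : Int) := by
    conv_lhs => rw [← hdecomp]
    exact R_of_decomp _ _ (line_nlF u) (pre_shape u)
  have hslice : PySem.List.slice (u ++ p) (some ((preOf u).length : Int)) (some (u.length : Int))
      = lineOf u := by
    rw [PySem.List.slice_natCast]
    have hup : u ++ p = preOf u ++ (lineOf u ++ p) := by rw [← List.append_assoc, hdecomp]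
    have hlen : (preOf u).length + (lineOf u).length = u.length := by
      have := congrArg List.length hdecomp; simpa using this
    rw [hup, List.drop_left]
    have hl : u.length - (preOf u).length = (lineOf u).length := by omega
    rw [hl, List.take_left]
  unfold startsCurrentLineA
  simp only [hrf, hR, hslice, beq_iff_eq]
  exact strip_eq_nil_iff (lineOf u)

theorem lineOf_pre_nil (cs : List Char) : lineOf (preOf cs) = [] := by
  rcases pre_shape cs with h | ⟨a, d, h, hd⟩ <;> rw [h]
  · rfl
  · simp [lineOf, List.takeWhile_cons, hd]

theorem hit_iff (cs p : List Char) (hp : p ≠ [])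
    (hh : PySem.Chars.isspace p.headI = false) (hnl : ∀ c ∈ p, nlF c = true) :
    (PySem.Chars.endswith cs p && startsCurrentLineA cs ((cs.length : Int) - (p.length : Int))) = true
      ↔ coreOf cs = p := by
  obtain ⟨h0, t, rfl⟩ : ∃ h0 t, p = h0 :: t := by
    cases p with
    | nil => exact absurd rfl hp
    | cons a b => exact ⟨a, b, rfl⟩
  constructor
  · intro h
    rw [Bool.and_eq_true] at h
    obtain ⟨u, hu⟩ := (PySem.Chars.endswith_iff _ _).mp h.1
    subst hu
    have harith : ((u ++ h0 :: t).length : Int) - ((h0 :: t).length : Int) = (u.length : Int) := by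
      simp
    rw [harith] at h
    have hsp := (startsCL_char u (h0 :: t) hnl).mp h.2
    rw [coreOf, lineOf_append u _ hnl, PySem.Chars.lstrip, List.dropWhile_append,
        List.isEmpty_iff.mpr (List.dropWhile_eq_nil_iff.mpr (fun x hx => hsp x hx)), if_pos rfl,
        List.dropWhile_cons, if_neg (by simp_all)]
  · intro h
    set w := (lineOf cs).takeWhile PySem.Chars.isspace with hw
    have hline : lineOf cs = w ++ h0 :: t := by
      rw [hw, ← h, coreOf, PySem.Chars.lstrip, List.takeWhile_append_dropWhile]
    have hcs : cs = (preOf cs ++ w) ++ h0 :: t := by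
      conv_lhs => rw [← pre_append_line cs, hline]
      simp
    have hwnl : ∀ c ∈ w, nlF c = true := fun c hc =>
      line_nlF cs c (by rw [hline]; exact List.mem_append.mpr (Or.inl hc))
    have hwsp : ∀ c ∈ w, PySem.Chars.isspace c = true := fun c hc => List.mem_takeWhile_imp hc
    have hlineu : lineOf (preOf cs ++ w) = w := by
      rw [lineOf_append _ _ hwnl, lineOf_pre_nil, List.nil_append]
    rw [Bool.and_eq_true]
    refine ⟨(PySem.Chars.endswith_iff _ _).mpr ⟨preOf cs ++ w, hcs.symm⟩, ?_⟩
    have harith : ((cs.length : Int)) - ((h0 :: t).length : Int) = ((preOf cs ++ w).length : Int) := by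
      have h1 : cs.length = (preOf cs ++ w).length + (h0 :: t).length := by
        conv_lhs => rw [hcs]
        simp
        omega
      omega
    have hfin := (startsCL_char (preOf cs ++ w) (h0 :: t) hnl).mpr (by rw [hlineu]; exact hwsp)
    rw [← hcs] at hfin
    rw [harith]
    exact hfin

-- scan specification: first pattern (in A's order) equal to core, with its start value
def scanSpec (core : List Char) (n : Int) (M : List Char) : List Int → Option Int
  | [] => none
  | i :: rest =>
    if core = M.take i.toNat then some (n - i)
    else if core = '[' :: M.take i.toNat then some (n - i - 1)
    else scanSpec core n M rest

theorem slice_facts (i : Int) (h1 : 1 ≤ i) (h2 : i ≤ 12) :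
    let part := Mlit.take i.toNat
    part ≠ [] ∧ PySem.Chars.isspace part.headI = false ∧ (∀ c ∈ part, nlF c = true) ∧
      ((part.length : Int) = i) ∧ PySem.Chars.isspace ('[' :: part).headI = false ∧
      (∀ c ∈ ('[' :: part), nlF c = true) := by
  interval_cases i <;>
    refine ⟨by decide, by decide, ?_, by decide, by decide, ?_⟩ <;>
    (intro c hc; fin_cases hc <;> rfl)

theorem aLoop_eq (cs : List Char) (is : List Int) (h : ∀ i ∈ is, 1 ≤ i ∧ i ≤ 12) :
    aLoop cs Mlit is = scanSpec (coreOf cs) (cs.length : Int) Mlit is := by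
  induction is with
  | nil => rfl
  | cons i rest ih =>
    obtain ⟨h1, h2⟩ := h i (by simp)
    have hsl : PySem.List.slice Mlit none (some i) = Mlit.take i.toNat :=
      PySem.List.slice_to _ (by omega)
    rw [aLoop, scanSpec, hsl]
    obtain ⟨f1, f2, f3, f4, f5, f6⟩ := slice_facts i h1 h2
    set part := Mlit.take i.toNat with hpart
    have hhit1 := hit_iff cs part f1 f2 f3
    have hhit2 := hit_iff cs ('[' :: part) (by simp) f5 f6
    have e2 : (cs.length : Int) - (('[' :: part).length : Int)
        = (cs.length : Int) - (part.length : Int) - 1 := by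
      rw [List.length_cons]; push_cast; ring
    rw [e2] at hhit2
    by_cases hc1 : coreOf cs = part
    · rw [if_pos (hhit1.mpr hc1), if_pos hc1, f4]
    · rw [if_neg (fun hh => hc1 (hhit1.mp hh)), if_neg hc1]
      by_cases hc2 : coreOf cs = '[' :: part
      · rw [if_pos (hhit2.mpr hc2), if_pos hc2, f4]
      · rw [if_neg (fun hh => hc2 (hhit2.mp hh)), if_neg hc2]
        exact ih (fun j hj => h j (by simp [hj]))

theorem bMain_eq (cs M : List Char) :
    bMain cs M =
      (if coreOf cs = [] then none
       else if coreOf cs = ['['] then some ((cs.length : Int) - (coreOf cs).length)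
       else
         let candidate := if PySem.Chars.startswith (coreOf cs) ['['] then PySem.List.slice (coreOf cs) (some 1) none else coreOf cs
         if 1 ≤ candidate.length ∧ candidate.length < M.length ∧ PySem.Chars.startswith M candidate = true
         then some ((cs.length : Int) - (coreOf cs).length) else none) := by
  set a := preOf cs with ha
  set b := lineOf cs with hb
  have hab : a ++ b = cs := pre_append_line cs
  have hR : max (PySem.Chars.rfind cs ['\n']) (PySem.Chars.rfind cs ['\r']) + 1 = (a.length : Int) := by
    conv_lhs => rw [← hab]
    exact R_of_decomp a b (by rw [hb]; exact line_nlF cs) (by rw [ha]; exact pre_shape cs)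
  have hdrop : PySem.List.slice cs (some (a.length : Int)) none = b := by
    rw [PySem.List.slice_from_natCast, ← hab, List.drop_left]
  unfold bMain
  simp only [hR, hdrop]
  rfl

theorem scanSpec_none (core : List Char) (n : Int) (M : List Char) (is : List Int)
    (h : ∀ i ∈ is, core ≠ M.take i.toNat ∧ core ≠ '[' :: M.take i.toNat) :
    scanSpec core n M is = none := by
  induction is with
  | nil => rfl
  | cons i rest ih =>
    obtain ⟨hh1, hh2⟩ := h i (by simp)
    rw [scanSpec, if_neg hh1, if_neg hh2]
    exact ih (fun j hj => h j (by simp [hj]))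

theorem classify (core : List Char) (n : Int) :
    (if core = ['['] then some (n - 1)
     else scanSpec core n Mlit [1,2,3,4,5,6,7,8,9,10,11,12]) =
      (if core = [] then none
       else if core = ['['] then some (n - (core.length : Int))
       else
         let candidate := if PySem.Chars.startswith core ['['] then PySem.List.slice core (some 1) none else core
         if 1 ≤ candidate.length ∧ candidate.length < Mlit.length ∧ PySem.Chars.startswith Mlit candidate = true
         then some (n - (core.length : Int)) else none) := by
  by_cases h0 : core = []
  · subst h0
    rw [if_neg (by decide), if_pos rfl]
    exact scanSpec_none _ _ _ _ (fun i hi => by fin_cases hi <;> exact ⟨by decide, by decide⟩)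
  · by_cases h1 : core = ['[']
    · subst h1
      rw [if_pos rfl, if_neg (by decide), if_pos rfl]
      norm_num
    · rw [if_neg h1, if_neg h0, if_neg h1]
      simp only [PySem.List.slice_from_one]
      by_cases hbr : PySem.Chars.startswith core ['['] = true
      · -- core starts with '['
        obtain ⟨t, rfl⟩ : ∃ t, core = '[' :: t := by
          cases core with
          | nil => exact absurd rfl h0
          | cons c t =>
            refine ⟨t, ?_⟩
            have hcEq : c = '[' := by
              have h' : '[' = c := by simpa [PySem.Chars.startswith, List.isPrefixOf] using hbr
              exact h'.symm
            rw [hcEq]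
        rw [if_pos hbr]
        simp only [List.tail_cons]
        by_cases hcond : 1 ≤ t.length ∧ t.length < Mlit.length ∧ PySem.Chars.startswith Mlit t = true
        · rw [if_pos hcond]
          obtain ⟨hl1, hl2, hl3⟩ := hcond
          have ht : t = Mlit.take t.length :=
            List.prefix_iff_eq_take.mp ((PySem.Chars.startswith_iff _ _).mp hl3)
          have hl2' : t.length < 13 := by simpa [Mlit] using hl2
          interval_cases hj : t.length <;> (rw [ht]; simp [scanSpec, Mlit]) <;> omega
        · rw [if_neg hcond]
          refine scanSpec_none _ _ _ _ (fun i hi => ?_)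
          fin_cases hi <;>
            exact ⟨by intro hh; apply_fun (·[0]?) at hh; simp [Mlit] at hh,
                   by simp [Mlit]; rintro rfl; exact hcond ⟨by decide, by decide, by decide⟩⟩
      · -- core does not start with '['
        rw [if_neg hbr]
        have hne : ∀ x : List Char, core ≠ '[' :: x := by
          intro x hx
          exact hbr (by rw [hx]; simp [PySem.Chars.startswith, List.isPrefixOf])
        by_cases hcond : 1 ≤ core.length ∧ core.length < Mlit.length ∧ PySem.Chars.startswith Mlit core = true
        · rw [if_pos hcond]
          obtain ⟨hl1, hl2, hl3⟩ := hcond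
          have ht : core = Mlit.take core.length :=
            List.prefix_iff_eq_take.mp ((PySem.Chars.startswith_iff _ _).mp hl3)
          have hl2' : core.length < 13 := by simpa [Mlit] using hl2
          interval_cases hj : core.length <;> (rw [ht]; simp [scanSpec, Mlit]) <;> omega
        · rw [if_neg hcond]
          refine scanSpec_none _ _ _ _ (fun i hi => ?_)
          fin_cases hi <;>
            exact ⟨by rintro rfl; exact hcond ⟨by decide, by decide, by decide⟩, hne _⟩

theorem main_lemma (cs : List Char) : aMain cs "Calling tool:".toList = bMain cs "Calling tool:".toList := by
  rw [markerEq, bMain_eq]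
  unfold aMain
  have hrange : PySem.List.pyRange 1 (↑(PySem.Chars.len Mlit)) 1
      = ([1,2,3,4,5,6,7,8,9,10,11,12] : List Int) := by decide
  have hbounds : ∀ i ∈ ([1,2,3,4,5,6,7,8,9,10,11,12] : List Int), 1 ≤ i ∧ i ≤ 12 := by
    intro i hi; fin_cases hi <;> omega
  rw [hrange, aLoop_eq cs _ hbounds, ← classify (coreOf cs) (cs.length : Int)]
  have harith : (cs.length : Int) - ((['['] : List Char).length : Int) = (cs.length : Int) - 1 := by
    norm_num
  have hhit := hit_iff cs ['['] (by decide) (by decide) (by intro c hc; fin_cases hc <;> rfl)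
  rw [harith] at hhit
  by_cases hc : coreOf cs = ['[']
  · rw [if_pos (hhit.mpr hc), if_pos hc]
  · rw [if_neg (fun hh => hc (hhit.mp hh)), if_neg hc]

-- ===== VERDICT (by name: the statement is the Claim_ definition above) =====
theorem find_trailing_calling_tool_prefix_py_spec : Claim_equal_find_trailing_calling_tool_prefix_py := by
  intro text _
  unfold Spec_find_trailing_calling_tool_prefix_py find_trailing_calling_tool_prefix_py find_trailing_calling_tool_prefix_py_alt
  exact main_lemma _
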